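-- pv_equiv track=rewrite | github.com/Xomware/xomify-backend | lambdas/common/device_tokens_dynamo.py | group_tokens_by_email
-- ===== SOURCE A (Python) =====
-- from typing import Any, Iterable, Iterator, Optional
--
-- def group_tokens_by_email(tokens: Iterable[dict[str, Any]]) -> dict[str, list[dict[str, Any]]]:
--     """Collapse multi-device rows into {email: [tokens]}."""
--     grouped: dict[str, list[dict[str, Any]]] = {}
--     for tok in tokens:
--         email = tok.get("email")
--         if not email:
--             continue
--         grouped.setdefault(email, []).append(tok)
--     return grouped
-- ===== SOURCE B (Python) =====
-- def _key(tok):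
--     e = tok.get("email")
--     return e if e else None
--
-- def group_tokens_by_email(tokens):
--     toks = list(tokens)
--     keys = []
--     for t in toks:
--         k = _key(t)
--         if k is not None and k not in keys:
--             keys.append(k)
--     return {k: [t for t in toks if _key(t) == k] for k in keys}
-- ===== Notes on version B (the rewrite author's own statement) =====
-- stated objective: alternative
-- what changed: B replaces A's single-pass dict accumulation (setdefault+append) by a two-phase plan: first collect the distinct truthy emails in order of first appearance, then build the result with one filter pass per key (a dict comprehension); no grouping dict is mutated.
import Mathlib
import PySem

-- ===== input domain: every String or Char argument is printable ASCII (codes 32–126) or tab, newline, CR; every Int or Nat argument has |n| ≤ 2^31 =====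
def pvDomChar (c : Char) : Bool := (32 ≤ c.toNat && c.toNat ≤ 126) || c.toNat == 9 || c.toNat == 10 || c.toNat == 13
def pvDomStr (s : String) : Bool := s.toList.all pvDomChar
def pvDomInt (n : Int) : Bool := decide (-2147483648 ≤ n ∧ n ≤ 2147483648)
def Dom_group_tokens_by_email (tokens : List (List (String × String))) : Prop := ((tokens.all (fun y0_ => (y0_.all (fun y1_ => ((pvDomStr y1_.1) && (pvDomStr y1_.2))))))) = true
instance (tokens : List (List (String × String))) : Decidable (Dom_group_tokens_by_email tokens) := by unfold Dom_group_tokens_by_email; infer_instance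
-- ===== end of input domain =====

-- B is an alternative two-phase formulation (keys first, then one filter per key), same cost class; not claimed faster.

-- ===== PORT A =====
-- A: one pass, grouped.setdefault(email, []).append(tok); Dict.modify email [] (· ++ [tok]) is exactly that.
def group_tokens_by_email (tokens : List (List (String × String))) : List (String × List (List (String × String))) :=
  (tokens.foldl
    (fun (grouped : PySem.Dict String (List (List (String × String)))) tok =>
      match (PySem.Dict.mk tok).get? "email" with
      | none => grouped
      | some email =>
        if email = "" then grouped
        else grouped.modify email [] (· ++ [tok]))
    PySem.Dict.empty).items

-- ===== PORT B =====
-- _key(tok): the truthy email of a row, or None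
def pvKey? (tok : List (String × String)) : Option String :=
  match (PySem.Dict.mk tok).get? "email" with
  | none => none
  | some e => if e = "" then none else some e

def group_tokens_by_email_alt (tokens : List (List (String × String))) : List (String × List (List (String × String))) :=
  (tokens.foldl
    (fun (keys : List String) t =>
      match pvKey? t with
      | none => keys
      | some k => if k ∈ keys then keys else keys ++ [k])
    []).map
    (fun k => (k, tokens.filter (fun t => pvKey? t == some k)))

-- ===== PRECONDITION & SPEC =====
def Spec_group_tokens_by_email (tokens : List (List (String × String))) (out : List (String × List (List (String × String)))) : Prop := out = group_tokens_by_email_alt tokens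
instance (tokens : List (List (String × String))) (out : List (String × List (List (String × String)))) : Decidable (Spec_group_tokens_by_email tokens out) := by unfold Spec_group_tokens_by_email; infer_instance

-- ===== CLAIM (what is proved, stated in full; the proofs are below) =====
def Claim_equal_group_tokens_by_email : Prop := ∀ (tokens : List (List (String × String))), Dom_group_tokens_by_email tokens → Spec_group_tokens_by_email tokens (group_tokens_by_email tokens)

-- ===== LEMMAS AND PROOFS =====

-- the (key, row) pairs A actually groups
def pvPairs (ts : List (List (String × String))) : List (String × List (String × String)) :=
  ts.filterMap (fun t => (pvKey? t).map (fun e => (e, t)))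

-- A's loop is the canonical grouping loop over pvPairs
theorem pvA_fold_eq (ts : List (List (String × String)))
    (g : PySem.Dict String (List (List (String × String)))) :
    ts.foldl
      (fun grouped tok =>
        match (PySem.Dict.mk tok).get? "email" with
        | none => grouped
        | some email =>
          if email = "" then grouped
          else grouped.modify email [] (· ++ [tok])) g
    = (pvPairs ts).foldl (fun d p => d.modify p.1 [] (· ++ [p.2])) g := by
  induction ts generalizing g with
  | nil => rfl
  | cons t ts ih =>
    simp only [List.foldl_cons, pvPairs, List.filterMap_cons]
    unfold pvKey?
    cases h : (PySem.Dict.mk t).get? "email" with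
    | none => simpa [pvPairs] using ih g
    | some e =>
      by_cases he : e = "" <;> simp [he] <;> [exact ih g; exact ih _]

-- B's key loop collects the first occurrences of the keys of pvPairs
theorem pvKeys_fold_eq (ts : List (List (String × String))) (s : List String) :
    ts.foldl
      (fun keys t =>
        match pvKey? t with
        | none => keys
        | some k => if k ∈ keys then keys else keys ++ [k]) s
    = PySem.Set.update s ((pvPairs ts).map (·.1)) := by
  induction ts generalizing s with
  | nil => simp [pvPairs, PySem.Set.update_nil]
  | cons t ts ih =>
    simp only [List.foldl_cons, pvPairs, List.filterMap_cons]
    cases h : pvKey? t with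
    | none => simpa [pvPairs] using ih s
    | some k =>
      have hadd : PySem.Set.add s k = if k ∈ s then s else s ++ [k] := by
        simp [PySem.Set.add]
      simp only [Option.map_some, List.map_cons, PySem.Set.update_cons, ← hadd]
      simpa [pvPairs] using ih (PySem.Set.add s k)

-- the rows of pvPairs carrying key k are exactly the rows t with pvKey? t = some k
theorem pvPairs_filter_eq (ts : List (List (String × String))) (k : String) :
    ((pvPairs ts).filter (fun p => p.1 == k)).map (·.2)
    = ts.filter (fun t => pvKey? t == some k) := by
  induction ts with
  | nil => rfl
  | cons t ts ih =>
    simp only [pvPairs, List.filterMap_cons]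
    cases h : pvKey? t with
    | none => simpa [pvPairs, h] using ih
    | some e =>
      by_cases he : e = k <;>
        simpa [pvPairs, h, he, List.filter_cons] using ih

-- ===== VERDICT (by name: the statement is the Claim_ definition above) =====
theorem group_tokens_by_email_spec : Claim_equal_group_tokens_by_email := by
  intro tokens _
  unfold Spec_group_tokens_by_email group_tokens_by_email group_tokens_by_email_alt
  rw [pvA_fold_eq, pvKeys_fold_eq]
  set d := (pvPairs tokens).foldl (fun d p => d.modify p.1 [] (· ++ [p.2])) PySem.Dict.empty with hd
  have hkeys : d.keys = PySem.Set.update (PySem.Dict.empty : PySem.Dict String (List (List (String × String)))).keys ((pvPairs tokens).map (·.1)) := by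
    rw [hd]
    exact PySem.Dict.keys_foldl_modify_key (pvPairs tokens) (·.1) [] (fun _ p => (· ++ [p.2])) _
  have hnd : d.keys.Nodup := by
    rw [hkeys]; exact PySem.Set.nodup_update _ _ (by simp [PySem.Dict.keys_empty])
  have hitems := PySem.Dict.items_eq_map_keys d hnd ([] : List (List (String × String)))
  rw [hitems, hkeys]
  simp only [PySem.Dict.keys_empty, PySem.Set.update_nil_left]
  apply List.map_congr_left
  intro k _
  have hget : d.getD k [] = ((pvPairs tokens).filter (fun p => p.1 == k)).map (·.2) := by
    rw [hd, PySem.Dict.getD_foldl_modify_append]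
    simp [PySem.Dict.getD_empty]
  rw [hget, pvPairs_filter_eq]
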